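-- pv_equiv track=rewrite | github.com/dimistsaousis/coursera | Algorithms & Data Structures Specialisation/Algorithmic Toolbox/Week2-Warmup/8_fibonacci_sum_squares.py | get_fibonacci_sum_squares_naive
-- ===== SOURCE A (Python) =====
-- def get_fibonacci_sum_squares_naive(n):
--     if n <= 1:
--         return n
--
--     previous = 0
--     current = 1
--     cum_sum = 1
--
--     for _ in range(n - 1):
--         previous, current = current, previous + current
--         cum_sum += current * current
--
--     return cum_sum % 10
-- ===== SOURCE B (Python) =====
-- def get_fibonacci_sum_squares_naive(n):
--     if n <= 1:
--         return n
--     def fib10(k):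
--         a, b = 0, 1
--         for _ in range(k % 60):
--             a, b = b, (a + b) % 10
--         return a
--     return (fib10(n) * fib10(n + 1)) % 10
-- ===== Notes on version B (the rewrite author's own statement) =====
-- stated objective: faster
-- what changed: Replaces the linear-time bignum loop summing Fibonacci squares with the closed-form identity (the sum equals the product of two consecutive Fibonacci numbers) computed modulo ten via the Pisano period, so only a constant number of single-digit steps are performed.
import Mathlib
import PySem

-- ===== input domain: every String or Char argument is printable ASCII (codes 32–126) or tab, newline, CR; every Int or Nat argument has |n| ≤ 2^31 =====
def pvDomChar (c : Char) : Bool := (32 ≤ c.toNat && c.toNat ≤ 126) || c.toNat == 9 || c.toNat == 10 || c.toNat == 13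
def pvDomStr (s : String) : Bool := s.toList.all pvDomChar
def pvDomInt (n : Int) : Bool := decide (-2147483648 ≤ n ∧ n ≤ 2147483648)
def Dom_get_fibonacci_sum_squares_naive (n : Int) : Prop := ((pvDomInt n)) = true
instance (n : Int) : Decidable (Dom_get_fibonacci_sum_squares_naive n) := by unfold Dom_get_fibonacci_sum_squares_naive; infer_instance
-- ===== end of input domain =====

-- ===== PORT A =====
-- B changes: closed-form product of consecutive Fibonacci numbers via the Pisano period instead of the linear bignum loop (objective: faster; measured).
def get_fibonacci_sum_squares_naive (n : Int) : Int :=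
  if n <= 1 then n
  else
    let st := (List.range (n - 1).toNat).foldl
      (fun (st : Int × Int × Int) _ =>
        let previous := st.1
        let current := st.2.1
        let cum_sum := st.2.2
        (current, previous + current, cum_sum + (previous + current) * (previous + current)))
      (0, 1, 1)
    PySem.Int.mod st.2.2 10

-- ===== PORT B =====
def pvFib10 (k : Int) : Int :=
  ((List.range (PySem.Int.mod k 60).toNat).foldl
    (fun (ab : Int × Int) _ => (ab.2, PySem.Int.mod (ab.1 + ab.2) 10)) (0, 1)).1

def get_fibonacci_sum_squares_naive_alt (n : Int) : Int :=
  if n <= 1 then n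
  else PySem.Int.mod (pvFib10 n * pvFib10 (n + 1)) 10

-- ===== PRECONDITION & SPEC =====
def Spec_get_fibonacci_sum_squares_naive (n : Int) (out : Int) : Prop := out = get_fibonacci_sum_squares_naive_alt n
instance (n : Int) (out : Int) : Decidable (Spec_get_fibonacci_sum_squares_naive n out) := by unfold Spec_get_fibonacci_sum_squares_naive; infer_instance

-- ===== CLAIM (what is proved, stated in full; the proofs are below) =====
def Claim_equal_get_fibonacci_sum_squares_naive : Prop := ∀ (n : Int), Dom_get_fibonacci_sum_squares_naive n → Spec_get_fibonacci_sum_squares_naive n (get_fibonacci_sum_squares_naive n)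

-- ===== LEMMAS AND PROOFS =====

-- mathematical Fibonacci numbers over Int
def pvfib : Nat → Int
  | 0 => 0
  | 1 => 1
  | (k+2) => pvfib k + pvfib (k+1)

lemma pvA_state (k : Nat) :
    (List.range k).foldl
      (fun (st : Int × Int × Int) _ =>
        let previous := st.1
        let current := st.2.1
        let cum_sum := st.2.2
        (current, previous + current, cum_sum + (previous + current) * (previous + current)))
      (0, 1, 1)
    = (pvfib k, pvfib (k+1), pvfib (k+1) * pvfib (k+2)) := by
  induction k with
  | zero => simp [pvfib]
  | succ k ih =>
    rw [List.range_succ, List.foldl_append, ih]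
    simp only [List.foldl_cons, List.foldl_nil]
    refine Prod.ext rfl (Prod.ext rfl ?_)
    show pvfib (k+1) * pvfib (k+2) + (pvfib k + pvfib (k+1)) * (pvfib k + pvfib (k+1))
        = pvfib (k+2) * pvfib (k+3)
    have h2 : pvfib (k+2) = pvfib k + pvfib (k+1) := rfl
    have h3 : pvfib (k+3) = pvfib (k+1) + pvfib (k+2) := rfl
    rw [h3, h2]; ring

lemma pvB_state (j : Nat) :
    (List.range j).foldl
      (fun (ab : Int × Int) _ => (ab.2, PySem.Int.mod (ab.1 + ab.2) 10)) (0, 1)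
    = (pvfib j % 10, pvfib (j+1) % 10) := by
  induction j with
  | zero => simp [pvfib]
  | succ j ih =>
    rw [List.range_succ, List.foldl_append, ih]
    simp only [List.foldl_cons, List.foldl_nil]
    refine Prod.ext rfl ?_
    show PySem.Int.mod (pvfib j % 10 + pvfib (j+1) % 10) 10 = pvfib (j+2) % 10
    rw [PySem.Int.mod_eq_emod_of_pos (by norm_num)]
    show (pvfib j % 10 + pvfib (j+1) % 10) % 10 = (pvfib j + pvfib (j+1)) % 10
    omega

-- Pisano period: fib mod 10 repeats with period 60
lemma pvfib_add60 : ∀ m, pvfib (m + 60) % 10 = pvfib m % 10 ∧ pvfib (m + 61) % 10 = pvfib (m+1) % 10 := by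
  intro m
  induction m with
  | zero => constructor <;> decide
  | succ m ih =>
    refine ⟨ih.2, ?_⟩
    have h62 : pvfib (m + 62) = pvfib (m + 60) + pvfib (m + 61) := rfl
    have hm2 : pvfib (m + 2) = pvfib m + pvfib (m + 1) := rfl
    have : m + 1 + 61 = m + 62 := by omega
    rw [this, h62]
    have : m + 1 + 1 = m + 2 := by omega
    rw [this, hm2, Int.add_emod, ih.1, ih.2, ← Int.add_emod]

lemma pvfib_mod60 (m : Nat) : pvfib m % 10 = pvfib (m % 60) % 10 := by
  induction m using Nat.strong_induction_on with
  | _ m ih =>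
    by_cases h : m < 60
    · rw [Nat.mod_eq_of_lt h]
    · have hm : m = (m - 60) + 60 := by omega
      rw [hm, (pvfib_add60 (m - 60)).1, ih (m - 60) (by omega), Nat.add_mod_right]

lemma pvFib10_eq (k : Int) (hk : 0 ≤ k) : pvFib10 k = pvfib k.toNat % 10 := by
  unfold pvFib10
  rw [PySem.Int.mod_eq_emod_of_pos (by norm_num : (0:Int) < 60)]
  rw [pvB_state]
  have h : (k % 60).toNat = k.toNat % 60 := by omega
  rw [h, ← pvfib_mod60]

-- ===== VERDICT (by name: the statement is the Claim_ definition above) =====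
theorem get_fibonacci_sum_squares_naive_spec : Claim_equal_get_fibonacci_sum_squares_naive := by
  intro n _
  unfold Spec_get_fibonacci_sum_squares_naive
  unfold get_fibonacci_sum_squares_naive get_fibonacci_sum_squares_naive_alt
  by_cases h : n <= 1
  · simp [h]
  · simp only [h, if_false]
    have hn : 2 ≤ n := by omega
    rw [pvA_state]
    have h1 : (n - 1).toNat + 1 = n.toNat := by omega
    have h2 : (n - 1).toNat + 2 = n.toNat + 1 := by omega
    rw [pvFib10_eq n (by omega), pvFib10_eq (n + 1) (by omega)]
    have h3 : (n + 1).toNat = n.toNat + 1 := by omega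
    rw [h1, h2, h3]
    rw [PySem.Int.mod_eq_emod_of_pos (by norm_num : (0:Int) < 10),
        PySem.Int.mod_eq_emod_of_pos (by norm_num : (0:Int) < 10)]
    rw [Int.mul_emod (pvfib n.toNat) (pvfib (n.toNat + 1)) 10]
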